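-- pv_equiv track=rewrite | github.com/elina-chertova/recommendation-service | collector/utils/helper.py | choose_users
-- ===== SOURCE A (Python) =====
-- def choose_users(user_movie: dict[tuple, str]) -> dict:
--     """
--     Selects users and their movies, ensuring each user has at most 5 movies.
--
--     :param user_movie: Dictionary with user-movie pairs.
--     :return: Dictionary with users as keys and their movies as values.
--     """
--     unique_first_elements = set()
--     users_movie_dict = {}
--
--     for key, value in user_movie.items():
--         user_element = key[0]
--         movie_element = key[1]
--
--         if user_element not in unique_first_elements:
--             unique_first_elements.add(user_element)
--             users_movie_dict[user_element] = []
--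
--         if len(users_movie_dict[user_element]) < 5:
--             users_movie_dict[user_element].append(movie_element)
--     return users_movie_dict
-- ===== SOURCE B (Python) =====
-- def choose_users(user_movie: dict[tuple, str]) -> dict:
--     users = list(dict.fromkeys(user for user, _ in user_movie))
--     return {user: [m for u, m in user_movie if u == user][:5] for user in users}
-- ===== Notes on version B (the rewrite author's own statement) =====
-- stated objective: alternative
-- what changed: B replaces A's single stateful pass (seen-set, dict of capped lists mutated per item) with a per-user nested scan: dedup the users once, then for each user filter the whole input for that user's movies and slice the first five; correct because A keeps exactly the first five movies of each user in input order and its keys appear in first-occurrence order.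
import Mathlib
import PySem

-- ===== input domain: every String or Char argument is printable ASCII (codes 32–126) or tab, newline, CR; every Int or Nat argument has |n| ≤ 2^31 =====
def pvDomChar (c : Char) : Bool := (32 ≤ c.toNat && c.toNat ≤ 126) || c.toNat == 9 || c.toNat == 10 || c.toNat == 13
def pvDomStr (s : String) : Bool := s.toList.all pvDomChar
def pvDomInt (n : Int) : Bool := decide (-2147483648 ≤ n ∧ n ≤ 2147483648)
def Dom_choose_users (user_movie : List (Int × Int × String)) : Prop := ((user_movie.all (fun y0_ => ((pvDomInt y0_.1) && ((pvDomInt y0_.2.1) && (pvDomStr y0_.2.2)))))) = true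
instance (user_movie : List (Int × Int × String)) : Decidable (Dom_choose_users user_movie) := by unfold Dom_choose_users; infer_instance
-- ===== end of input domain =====

-- B replaces A's single stateful pass with a per-user nested scan: dedup the users once,
-- then for each user filter the whole input for that user's movies and take the first five.


-- ===== PORT A =====
-- loop state: (unique_first_elements, users_movie_dict)
-- `users_movie_dict[user_element].append(movie_element)` is ported as `modify u [] (· ++ [m])`;
-- exact here because at that point u is always a present key (it was just inserted if fresh).
def chooseUsersStepA (st : PySem.Set Int × PySem.Dict Int (List Int))
    (kv : Int × Int × String) : PySem.Set Int × PySem.Dict Int (List Int) :=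
  let u := kv.1
  let m := kv.2.1
  let st1 := if PySem.Set.contains st.1 u then st
             else (PySem.Set.add st.1 u, st.2.insert u [])
  if (st1.2.getD u []).length < 5 then (st1.1, st1.2.modify u [] (· ++ [m])) else st1

def choose_users (user_movie : List (Int × Int × String)) : List (Int × List Int) :=
  (user_movie.foldl chooseUsersStepA (PySem.Set.empty, PySem.Dict.empty)).2.items

-- ===== PORT B =====
-- users = list(dict.fromkeys(...)) → PySem.List.dedup; [...][:5] → slice none (some 5)
def choose_users_alt (user_movie : List (Int × Int × String)) : List (Int × List Int) :=
  let users := PySem.List.dedup (user_movie.map (·.1))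
  users.map (fun user =>
    (user, PySem.List.slice ((user_movie.filter (fun kv => kv.1 == user)).map (·.2.1))
             none (some 5)))

-- ===== PRECONDITION & SPEC =====
def Spec_choose_users (user_movie : List (Int × Int × String)) (out : List (Int × List Int)) : Prop := out = choose_users_alt user_movie
instance (user_movie : List (Int × Int × String)) (out : List (Int × List Int)) : Decidable (Spec_choose_users user_movie out) := by unfold Spec_choose_users; infer_instance

-- ===== CLAIM (what is proved, stated in full; the proofs are below) =====
def Claim_equal_choose_users : Prop := ∀ (user_movie : List (Int × Int × String)), Dom_choose_users user_movie → Spec_choose_users user_movie (choose_users user_movie)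

-- ===== LEMMAS AND PROOFS =====

-- capped append = append-then-truncate
theorem take_five_append (b : List Int) (m : Int) :
    (b ++ [m]).take 5 = if (b.take 5).length < 5 then b.take 5 ++ [m] else b.take 5 := by
  rcases Nat.lt_or_ge b.length 5 with h | h
  · have hb : b.take 5 = b := List.take_of_length_le (by omega)
    rw [hb, if_pos (by omega)]
    exact List.take_of_length_le (by simp; omega)
  · rw [List.take_append_of_le_length h]
    simp [List.length_take, Nat.min_eq_left h]

-- the invariant of A's loop over the processed prefix p: the seen-set is the key list,
-- the keys are the deduped users of p, and each value is the first 5 of p's movies of that user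
theorem chooseUsers_fold_inv (p : List (Int × Int × String)) :
    (p.foldl chooseUsersStepA (PySem.Set.empty, PySem.Dict.empty)).1 =
      (p.foldl chooseUsersStepA (PySem.Set.empty, PySem.Dict.empty)).2.keys ∧
    (p.foldl chooseUsersStepA (PySem.Set.empty, PySem.Dict.empty)).2.keys =
      PySem.List.dedup (p.map (·.1)) ∧
    ∀ k, (p.foldl chooseUsersStepA (PySem.Set.empty, PySem.Dict.empty)).2.getD k [] =
      ((p.filter (fun kv => kv.1 == k)).map (·.2.1)).take 5 := by
  induction p using List.reverseRecOn with
  | nil =>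
    refine ⟨rfl, rfl, fun k => ?_⟩
    simp [PySem.Dict.getD_empty]
  | append_singleton p kv ih =>
    obtain ⟨u, m, v⟩ := kv
    rw [List.foldl_append, List.foldl_cons, List.foldl_nil]
    rcases hpair : p.foldl chooseUsersStepA (PySem.Set.empty, PySem.Dict.empty) with ⟨s, d⟩
    rw [hpair] at ih
    obtain ⟨hs, hk, hv⟩ := ih
    simp only at hs hk hv
    have hdedup : PySem.List.dedup ((p ++ [(u, m, v)]).map (·.1)) =
        PySem.Set.add (PySem.List.dedup (p.map (·.1))) u := by
      simp only [PySem.List.dedup_eq_ofList, List.map_append, List.map_cons, List.map_nil,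
        PySem.Set.ofList_append_singleton]
    have hfilter : ∀ k : Int, (p ++ [(u, m, v)]).filter (fun kv => kv.1 == k) =
        p.filter (fun kv => kv.1 == k) ++ if u == k then [(u, m, v)] else [] := by
      intro k
      rw [List.filter_append]
      by_cases h : u = k <;> simp [h]
    by_cases hmem : u ∈ s
    · -- user already seen: the membership branch is a no-op
      have hc : PySem.Set.contains s u = true := (PySem.Set.contains_iff s u).mpr hmem
      have hmemd : u ∈ PySem.List.dedup (p.map (·.1)) := by rw [← hk, ← hs]; exact hmem
      have hadd : PySem.Set.add (PySem.List.dedup (p.map (·.1))) u =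
          PySem.List.dedup (p.map (·.1)) := PySem.Set.add_of_mem hmemd
      simp only [chooseUsersStepA, hc, if_true]
      by_cases h5 : (d.getD u []).length < 5
      · rw [if_pos h5]
        have hcd : d.contains u = true := by
          rw [PySem.Dict.contains_eq_decide_mem_keys, ← hs]; simpa using hmem
        refine ⟨?_, ?_, fun k => ?_⟩
        · rw [hs, PySem.Dict.keys_modify, PySem.Dict.keys_insert_of_contains _ _ hcd]
        · rw [PySem.Dict.keys_modify, PySem.Dict.keys_insert_of_contains _ _ hcd,
            hk, hdedup, hadd]
        · rw [PySem.Dict.getD_modify, hfilter k]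
          by_cases hke : k = u
          · subst hke
            rw [if_pos rfl, hv k]
            simp only [beq_self_eq_true, if_true, List.map_append, List.map_cons, List.map_nil]
            rw [take_five_append, if_pos (by rw [← hv k]; exact h5)]
          · rw [if_neg hke, hv k]
            have hne : (u == k) = false := by simp [Ne.symm hke]
            simp [hne]
      · rw [if_neg h5]
        refine ⟨hs, ?_, fun k => ?_⟩
        · rw [hk, hdedup, hadd]
        · rw [hfilter k]
          by_cases hke : k = u
          · subst hke
            rw [hv k]
            simp only [beq_self_eq_true, if_true, List.map_append, List.map_cons, List.map_nil]
            rw [take_five_append, if_neg (by rw [← hv k]; exact h5)]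
          · rw [hv k]
            have hne : (u == k) = false := by simp [Ne.symm hke]
            simp [hne]
    · -- fresh user: both the set and the key list gain u, its value becomes [m]
      have hc : PySem.Set.contains s u = false := by
        rw [← Bool.not_eq_true]; exact fun h => hmem ((PySem.Set.contains_iff s u).mp h)
      have hcd : d.contains u = false := by
        rw [PySem.Dict.contains_eq_decide_mem_keys, ← hs]; simpa using hmem
      have hget0 : (d.insert u []).getD u ([] : List Int) = [] :=
        PySem.Dict.getD_insert_self d u [] []
      have hmemd : u ∉ PySem.List.dedup (p.map (·.1)) := by rw [← hk, ← hs]; exact hmem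
      simp only [chooseUsersStepA, hc, Bool.false_eq_true, if_false]
      rw [if_pos (by simp [hget0])]
      have hkeys : ((d.insert u []).modify u [] (· ++ [m])).keys = d.keys ++ [u] := by
        rw [PySem.Dict.keys_modify, PySem.Dict.keys_insert_of_contains _ _
          (PySem.Dict.contains_insert_self d u []),
          PySem.Dict.keys_insert_of_not_contains _ _ hcd]
      refine ⟨?_, ?_, fun k => ?_⟩
      · rw [hkeys, hs, PySem.Set.add_of_not_mem (by rw [hs] at hmem; exact hmem)]
      · rw [hkeys, hk, hdedup, PySem.Set.add_of_not_mem hmemd]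
      · rw [PySem.Dict.getD_modify, hfilter k]
        by_cases hke : k = u
        · subst hke
          rw [if_pos rfl, hget0]
          have hfe : p.filter (fun kv => kv.1 == k) = [] := by
            rw [List.filter_eq_nil_iff]
            intro kv hkv hbeq
            exact hmemd (by
              rw [PySem.List.mem_dedup]
              exact List.mem_map.mpr ⟨kv, hkv, by simpa using hbeq⟩)
          simp [hfe]
        · rw [if_neg hke, PySem.Dict.getD_insert, if_neg hke, hv k]
          have hne : (u == k) = false := by simp [Ne.symm hke]
          simp [hne]

-- ===== VERDICT (by name: the statement is the Claim_ definition above) =====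
theorem choose_users_spec : Claim_equal_choose_users := by
  intro um _
  show choose_users um = choose_users_alt um
  unfold choose_users choose_users_alt
  obtain ⟨-, hk, hv⟩ := chooseUsers_fold_inv um
  have hnd : (um.foldl chooseUsersStepA (PySem.Set.empty, PySem.Dict.empty)).2.keys.Nodup := by
    rw [hk]; exact PySem.List.nodup_dedup _
  rw [PySem.Dict.items_eq_map_keys _ hnd ([] : List Int), hk]
  apply List.map_congr_left
  intro k _
  refine Prod.ext rfl ?_
  simp only [PySem.List.slice_to _ (by norm_num : (0:Int) ≤ 5)]
  exact hv k
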